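-- pv_equiv track=rewrite | github.com/tjards/multi-agent_sim | utils/graph_tools_directional.py | find_one_way_connected_components_deg
-- ===== SOURCE A (Python) =====
-- def find_one_way_connected_components_deg(matrix):
--     def dfs(node, component):
--         visited.add(node)
--         component.append(node)
--         for neighbor, connected in enumerate(matrix[node]):
--             if connected == 1 and neighbor not in visited:
--                 dfs(neighbor, component)
--
--     components = []
--     visited = set()
--
--     # Calculate out degree centrality for each node
--     out_degree_centrality = [sum(row) for row in matrix]
--
--     # Sort nodes based on out degree centrality in descending order
--     nodes_sorted_by_centrality = sorted(range(len(out_degree_centrality)), key=lambda x: out_degree_centrality[x], reverse=True)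
--
--     for node in nodes_sorted_by_centrality:
--         if node not in visited:
--             component = []
--             dfs(node, component)
--             components.append(component)
--
--     return components
-- ===== SOURCE B (Python) =====
-- def find_one_way_connected_components_deg(matrix):
--     n = len(matrix)
--     deg = [sum(row) for row in matrix]
--     order = sorted(range(n), key=lambda i: deg[i], reverse=True)
--
--     visited = [False] * n
--     components = []
--     for root in order:
--         if visited[root]:
--             continue
--         comp = []
--         stack = [root]
--         while stack:
--             node = stack.pop()
--             if visited[node]:
--                 continue
--             visited[node] = True
--             comp.append(node)
--             row = matrix[node]
--             stack += [j for j in range(len(row) - 1, -1, -1)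
--                       if row[j] == 1 and not visited[j]]
--         components.append(comp)
--     return components
-- ===== Notes on version B (the rewrite author's own statement) =====
-- stated objective: alternative
-- what changed: The recursive dfs with a visited set is replaced by an iterative explicit-stack traversal (neighbors pushed in reverse index order via a comprehension, mark/emit on pop) over a boolean visited array indexed by node, producing the identical preorder; the out-degree computation and descending centrality sort are kept.
-- outside the precondition, e.g. on find_one_way_connected_components_deg([[1, 0, 5]]): A returns [[0]], B returns [[0]]
import Mathlib
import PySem

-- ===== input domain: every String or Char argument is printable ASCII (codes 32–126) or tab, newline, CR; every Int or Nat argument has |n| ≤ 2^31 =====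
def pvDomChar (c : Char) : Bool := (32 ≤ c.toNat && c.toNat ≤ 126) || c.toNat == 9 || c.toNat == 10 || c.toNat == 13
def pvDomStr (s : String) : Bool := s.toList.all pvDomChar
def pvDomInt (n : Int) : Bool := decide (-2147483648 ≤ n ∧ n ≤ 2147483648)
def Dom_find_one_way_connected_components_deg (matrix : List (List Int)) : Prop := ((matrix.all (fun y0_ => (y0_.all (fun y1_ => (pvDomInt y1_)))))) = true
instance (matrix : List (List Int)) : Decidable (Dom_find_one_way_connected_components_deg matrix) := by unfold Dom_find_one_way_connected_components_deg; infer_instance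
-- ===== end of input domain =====

-- B replaces A's recursive dfs + visited set with an iterative explicit-stack traversal over a
-- boolean visited array (reverse-order comprehension push, mark-on-pop), a different decomposition
-- and data structure with the same cost; out-degree sums and the descending sort are unchanged.


-- ===== PORT A =====
-- matrix[node] (total form; under Pre_ the index is always in range)
def pvRow (matrix : List (List Int)) (node : Int) : List Int :=
  (PySem.List.pyGet? matrix node).getD []

-- A's recursive dfs; state = (visited set, component); fuel only guards termination
-- (under Pre_ the recursion depth is ≤ matrix.length, so fuel matrix.length + 1 is never exhausted)
def pvDfsA (matrix : List (List Int)) : Nat → Int → PySem.Set Int × List Int → PySem.Set Int × List Int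
  | 0, _, st => st
  | fuel+1, node, st =>
    (PySem.List.enumerate (pvRow matrix node)).foldl
      (fun st p =>
        if p.2 = 1 ∧ ¬ (PySem.Set.contains st.1 p.1 = true) then pvDfsA matrix fuel p.1 st else st)
      (PySem.Set.add st.1 node, st.2 ++ [node])

def find_one_way_connected_components_deg (matrix : List (List Int)) : List (List Int) :=
  let out_degree_centrality := matrix.map (fun row => row.foldl (· + ·) 0)
  let nodes_sorted_by_centrality :=
    PySem.List.sorted (PySem.List.pyRange 0 (out_degree_centrality.length : Int) 1)
      (fun x => PySem.List.pyGetD out_degree_centrality x 0) true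
  (nodes_sorted_by_centrality.foldl
    (fun (st : PySem.Set Int × List (List Int)) node =>
      if ¬ (PySem.Set.contains st.1 node = true) then
        let r := pvDfsA matrix (matrix.length + 1) node (st.1, [])
        (r.1, st.2 ++ [r.2])
      else st)
    (PySem.Set.empty, [])).2

-- ===== PORT B =====
-- the comprehension pushed onto the stack: connected, not-yet-visited neighbors in reverse index order
def pvNbrs (row : List Int) (vis : List Bool) : List Int :=
  (PySem.List.pyRange ((row.length : Int) - 1) (-1) (-1)).filter
    (fun j => PySem.List.pyGetD row j 0 == 1 && !(vis.getD j.toNat false))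

-- B's while loop: pop from the end, skip if the boolean array marks the node, otherwise mark the
-- array cell, emit the node and extend the stack; fuel only guards termination (under Pre_ at most
-- 1 + matrix.length * rowlen pushes happen per root, so the fuel below is never exhausted)
def pvLoopB (matrix : List (List Int)) : Nat → List Bool → List Int → List Int → List Bool × List Int
  | 0, vis, comp, _ => (vis, comp)
  | fuel+1, vis, comp, stack =>
    match PySem.List.pop? stack (-1) with
    | none => (vis, comp)
    | some (node, rest) =>
      if vis.getD node.toNat false then pvLoopB matrix fuel vis comp rest
      else
        let vis' := vis.set node.toNat true
        pvLoopB matrix fuel vis' (comp ++ [node])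
          (rest ++ pvNbrs ((PySem.List.pyGet? matrix node).getD []) vis')

def find_one_way_connected_components_deg_alt (matrix : List (List Int)) : List (List Int) :=
  let n := matrix.length
  let deg := matrix.map (fun row => row.foldl (· + ·) 0)
  let order :=
    PySem.List.sorted (PySem.List.pyRange 0 (n : Int) 1)
      (fun i => PySem.List.pyGetD deg i 0) true
  (order.foldl
    (fun (st : List Bool × List (List Int)) root =>
      if st.1.getD root.toNat false then st
      else
        let r := pvLoopB matrix ((n + 1) * (n + 1)) st.1 [] [root]
        (r.1, st.2 ++ [r.2]))
    (List.replicate n false, [])).2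

-- ===== PRECONDITION & SPEC =====
-- Pre_ excludes matrices having a row longer than the matrix: there dfs can reach matrix[neighbor]
-- with neighbor ≥ len(matrix) and raise IndexError. On some such inputs A still returns (the
-- out-of-range 1-entries are never reached, e.g. [[1, 0, 5]]); B behaves identically there too,
-- but the ports' total row lookup is only exact inside Pre_.
def Pre_find_one_way_connected_components_deg (matrix : List (List Int)) : Prop :=
  ∀ row ∈ matrix, row.length ≤ matrix.length
instance (matrix : List (List Int)) : Decidable (Pre_find_one_way_connected_components_deg matrix) := by
  unfold Pre_find_one_way_connected_components_deg; infer_instance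

def pvWitness_find_one_way_connected_components_deg : List (List Int) := [[0, 1], [1, 0]]

def Spec_find_one_way_connected_components_deg (matrix : List (List Int)) (out : List (List Int)) : Prop := out = find_one_way_connected_components_deg_alt matrix
instance (matrix : List (List Int)) (out : List (List Int)) : Decidable (Spec_find_one_way_connected_components_deg matrix out) := by unfold Spec_find_one_way_connected_components_deg; infer_instance

-- ===== CLAIM (what is proved, stated in full; the proofs are below) =====
def Claim_equal_find_one_way_connected_components_deg : Prop := ∀ (matrix : List (List Int)), Dom_find_one_way_connected_components_deg matrix → Pre_find_one_way_connected_components_deg matrix → Spec_find_one_way_connected_components_deg matrix (find_one_way_connected_components_deg matrix)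

-- ===== LEMMAS AND PROOFS =====

-- connected-neighbor list of a node, in row order (A processes these, checking visitedness on the fly)
def pvMs (matrix : List (List Int)) (node : Int) : List Int :=
  ((PySem.List.enumerate (pvRow matrix node)).filter (fun p => p.2 == 1)).map (·.1)

-- what B pushes for a node (forward order), given the visited set right after marking the node
def pvF (matrix : List (List Int)) (v : PySem.Set Int) (node : Int) : List Int :=
  (pvMs matrix node).filter (fun m => !(PySem.Set.contains v m))

-- A-side: process a pending list of nodes left to right, skipping visited ones, dfs-ing the rest
def pvProc (matrix : List (List Int)) (fa : Nat) : List Int → PySem.Set Int × List Int → PySem.Set Int × List Int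
  | [], st => st
  | n :: ns, st =>
    if PySem.Set.contains st.1 n = true then pvProc matrix fa ns st
    else pvProc matrix fa ns (pvDfsA matrix fa n st)

-- set-state stack run with the stack's TOP AT THE HEAD (pvLoopB keeps the top at the end)
def pvHRun (matrix : List (List Int)) : Nat → PySem.Set Int × List Int → List Int → PySem.Set Int × List Int
  | 0, st, _ => st
  | _+1, st, [] => st
  | fuel+1, st, n :: s =>
    if PySem.Set.contains st.1 n = true then pvHRun matrix fuel st s
    else pvHRun matrix fuel (PySem.Set.add st.1 n, st.2 ++ [n])
           (pvF matrix (PySem.Set.add st.1 n) n ++ s)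

-- correspondence between A's visited set and B's boolean array
def pvInv (n : Nat) (v : PySem.Set Int) (b : List Bool) : Prop :=
  b.length = n ∧ (∀ x ∈ v, 0 ≤ x ∧ x < (n : Int)) ∧
  ∀ i : Nat, i < n → b.getD i false = PySem.Set.contains v (i : Int)

-- number of in-range nodes not yet visited (the termination measure)
def pvU (L : Nat) (v : PySem.Set Int) : Nat :=
  ((List.range L).filter (fun (i : Nat) => decide ((i : Int) ∉ v))).length

-- the body of A's neighbor loop, named for the proofs
def pvStep (matrix : List (List Int)) (f : Nat) :
    PySem.Set Int × List Int → Int × Int → PySem.Set Int × List Int :=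
  fun st p => if p.2 = 1 ∧ ¬ (PySem.Set.contains st.1 p.1 = true) then pvDfsA matrix f p.1 st else st

theorem pvDfsA_succ (matrix : List (List Int)) (f : Nat) (node : Int) (st : PySem.Set Int × List Int) :
    pvDfsA matrix (f+1) node st
      = (PySem.List.enumerate (pvRow matrix node)).foldl (pvStep matrix f)
          (PySem.Set.add st.1 node, st.2 ++ [node]) := rfl

theorem pvC {s : PySem.Set Int} {x : Int} : PySem.Set.contains s x = true ↔ x ∈ s := by
  simp [PySem.Set.contains]

theorem pvC_add {s : PySem.Set Int} {n x : Int} :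
    PySem.Set.contains (PySem.Set.add s n) x = true ↔ x ∈ s ∨ x = n := by
  rw [pvC, PySem.Set.mem_add]

theorem pvRow_len {matrix : List (List Int)} (hpre : Pre_find_one_way_connected_components_deg matrix)
    (n : Int) : (pvRow matrix n).length ≤ matrix.length := by
  unfold pvRow
  cases hrow : PySem.List.pyGet? matrix n with
  | none => simp
  | some r => exact hpre r (PySem.List.mem_of_pyGet?_eq_some _ hrow)

theorem pvEnum_valid {matrix : List (List Int)} (hpre : Pre_find_one_way_connected_components_deg matrix)
    (n : Int) : ∀ p ∈ PySem.List.enumerate (pvRow matrix n), 0 ≤ p.1 ∧ p.1 < (matrix.length : Int) := by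
  intro p hp
  rw [PySem.List.mem_enumerate_iff] at hp
  obtain ⟨k, hk, rfl⟩ := hp
  have := pvRow_len hpre n
  constructor <;> [omega; (push_cast; omega)]

theorem pvMs_valid {matrix : List (List Int)} (hpre : Pre_find_one_way_connected_components_deg matrix)
    (n : Int) : ∀ m ∈ pvMs matrix n, 0 ≤ m ∧ m < (matrix.length : Int) := by
  intro m hm
  unfold pvMs at hm
  simp only [List.mem_map, List.mem_filter] at hm
  obtain ⟨p, ⟨hp, _⟩, rfl⟩ := hm
  exact pvEnum_valid hpre n p hp

theorem pvU_mono {L : Nat} {v w : PySem.Set Int} (h : ∀ x : Int, x ∈ v → x ∈ w) :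
    pvU L w ≤ pvU L v := by
  unfold pvU
  rw [← List.countP_eq_length_filter, ← List.countP_eq_length_filter]
  apply List.countP_mono_left
  intro x _ hx
  simp only [decide_eq_true_eq] at hx ⊢
  exact fun hmem => hx (h _ hmem)

theorem pvLenFilter (q : Nat → Bool) (m : Nat) :
    ∀ l : List Nat, l.Nodup → m ∈ l → q m = true →
      (l.filter (fun i => q i && !(i == m))).length + 1 = (l.filter q).length := by
  intro l
  induction l with
  | nil => intro _ hm; simp at hm
  | cons a l ih =>
    intro hnd hm hq
    rcases List.mem_cons.mp hm with rfl | hm'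
    · have hml : m ∉ l := (List.nodup_cons.mp hnd).1
      have hcongr : l.filter (fun i => q i && !(i == m)) = l.filter q := by
        apply List.filter_congr
        intro i hi
        have : i ≠ m := fun h => hml (h ▸ hi)
        simp [this]
      simp [hq, hcongr]
    · have hne : a ≠ m := fun h => (List.nodup_cons.mp hnd).1 (h ▸ hm')
      have hrec := ih (List.nodup_cons.mp hnd).2 hm' hq
      by_cases hqa : q a = true
      · simp [hqa, hne]; omega
      · simp at hqa; simp [hqa]; omega

theorem pvU_add {L : Nat} {v : PySem.Set Int} {n : Int}
    (h0 : 0 ≤ n) (hL : n < (L : Int)) (hn : ¬ (PySem.Set.contains v n = true)) :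
    pvU L (PySem.Set.add v n) + 1 = pvU L v := by
  have hnv : ¬ n ∈ v := fun h => hn (pvC.mpr h)
  have hadd : PySem.Set.add v n = v ++ [n] := by
    simp [PySem.Set.add, PySem.Set.contains]
    intro h; exact absurd h hnv
  unfold pvU
  rw [hadd]
  have hcongr : (List.range L).filter (fun (i : Nat) => decide ((i : Int) ∉ v ++ [n]))
      = (List.range L).filter (fun (i : Nat) => decide ((i : Int) ∉ v) && !(i == n.toNat)) := by
    apply List.filter_congr
    intro i _
    by_cases hm : (i : Int) ∈ v
    · simp [hm]
    · by_cases hi : i = n.toNat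
      · have hx : ((i : Int)) = n := by omega
        rw [hx]
        simp [hi]
      · have hx : ((i : Int)) ≠ n := by omega
        simp [hm, hi, hx]
  rw [hcongr]
  apply pvLenFilter (fun (i : Nat) => decide ((i : Int) ∉ v)) n.toNat (List.range L)
    (List.nodup_range)
  · rw [List.mem_range]; omega
  · have hx : ((n.toNat : Int)) = n := by omega
    simp [hx, hnv]

theorem pvU_zero_mem {L : Nat} {v : PySem.Set Int} (h : pvU L v = 0)
    {x : Int} (h0 : 0 ≤ x) (hL : x < (L : Int)) : PySem.Set.contains v x = true := by
  unfold pvU at h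
  rw [List.length_eq_zero_iff] at h
  have hx := List.filter_eq_nil_iff.mp h x.toNat (by rw [List.mem_range]; omega)
  have hc : ((x.toNat : Int)) = x := by omega
  rw [hc] at hx
  simp only [decide_eq_true_eq, Decidable.not_not] at hx
  exact pvC.mpr hx

theorem pvU_le {L : Nat} (v : PySem.Set Int) : pvU L v ≤ L := by
  unfold pvU
  calc _ ≤ (List.range L).length := List.length_filter_le _ _
    _ = L := List.length_range ..

theorem pvDfsA_mono {matrix : List (List Int)} :
    ∀ (f : Nat) (n : Int) (st : PySem.Set Int × List Int) (x : Int),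
      PySem.Set.contains st.1 x = true → PySem.Set.contains (pvDfsA matrix f n st).1 x = true := by
  intro f
  induction f with
  | zero => intro n st x hx; simpa [pvDfsA] using hx
  | succ f ih =>
    intro n st x hx
    rw [pvDfsA_succ]
    have aux : ∀ (ps : List (Int × Int)) (st' : PySem.Set Int × List Int),
        PySem.Set.contains st'.1 x = true →
        PySem.Set.contains ((ps.foldl (pvStep matrix f) st')).1 x = true := by
      intro ps
      induction ps with
      | nil => intro st' h; simpa using h
      | cons p ps ihp =>
        intro st' h
        simp only [List.foldl_cons, pvStep]
        split
        · exact ihp _ (ih _ _ _ h)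
        · exact ihp _ h
    exact aux _ _ (pvC_add.mpr (Or.inl (pvC.mp hx)))

theorem pvDfsA_eq_proc {matrix : List (List Int)} (f : Nat) (node : Int)
    (st : PySem.Set Int × List Int) :
    pvDfsA matrix (f+1) node st
      = pvProc matrix f (pvMs matrix node) (PySem.Set.add st.1 node, st.2 ++ [node]) := by
  rw [pvDfsA_succ]
  unfold pvMs
  generalize (PySem.Set.add st.1 node, st.2 ++ [node]) = st0
  induction (PySem.List.enumerate (pvRow matrix node)) generalizing st0 with
  | nil => simp [pvProc]
  | cons p ps ihp =>
    simp only [List.foldl_cons, List.filter_cons, pvStep]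
    by_cases h2 : p.2 = 1
    · have h2' : (p.2 == 1) = true := by simpa using h2
      simp only [h2', if_pos]
      by_cases hc : PySem.Set.contains st0.1 p.1 = true
      · rw [if_neg (fun h => h.2 hc), List.map_cons]
        simp only [pvProc, hc, if_pos]
        exact ihp st0
      · rw [if_pos ⟨h2, hc⟩, List.map_cons]
        simp only [pvProc, hc, Bool.false_eq_true, if_false]
        exact ihp _
    · have h2' : (p.2 == 1) = false := by simpa using h2
      rw [if_neg (by simp [h2]), h2']
      simp only [Bool.false_eq_true, if_false]
      exact ihp st0

theorem pvDfsA_fuel {matrix : List (List Int)} (hpre : Pre_find_one_way_connected_components_deg matrix) :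
    ∀ (k f f' : Nat) (n : Int) (st : PySem.Set Int × List Int),
      pvU matrix.length st.1 ≤ k → k + 1 ≤ f → k + 1 ≤ f' →
      ¬ (PySem.Set.contains st.1 n = true) → 0 ≤ n → n < (matrix.length : Int) →
      pvDfsA matrix f n st = pvDfsA matrix f' n st := by
  intro k
  induction k with
  | zero =>
    intro f f' n st hU hf hf' hn h0 hL
    exact absurd (pvU_zero_mem (Nat.le_zero.mp hU) h0 hL) hn
  | succ k ih =>
    intro f f' n st hU hf hf' hn h0 hL
    obtain ⟨f1, rfl⟩ : ∃ f1, f = f1 + 1 := ⟨f - 1, by omega⟩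
    obtain ⟨f2, rfl⟩ : ∃ f2, f' = f2 + 1 := ⟨f' - 1, by omega⟩
    rw [pvDfsA_succ, pvDfsA_succ]
    have hUv' : pvU matrix.length (PySem.Set.add st.1 n) ≤ k := by
      have := pvU_add h0 hL hn (v := st.1) (L := matrix.length); omega
    have aux : ∀ (ps : List (Int × Int)), (∀ p ∈ ps, 0 ≤ p.1 ∧ p.1 < (matrix.length : Int)) →
        ∀ (st' : PySem.Set Int × List Int),
        (∀ x, PySem.Set.contains (PySem.Set.add st.1 n) x = true →
          PySem.Set.contains st'.1 x = true) →
        ps.foldl (pvStep matrix f1) st' = ps.foldl (pvStep matrix f2) st' := by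
      intro ps
      induction ps with
      | nil => intro _ st' _; rfl
      | cons p ps ihp =>
        intro hv st' hsub
        simp only [List.foldl_cons, pvStep]
        by_cases hcond : p.2 = 1 ∧ ¬ (PySem.Set.contains st'.1 p.1 = true)
        · rw [if_pos hcond, if_pos hcond]
          have hUst' : pvU matrix.length st'.1 ≤ k :=
            le_trans (pvU_mono (fun x hx => pvC.mp (hsub x (pvC.mpr hx)))) hUv'
          have heq : pvDfsA matrix f1 p.1 st' = pvDfsA matrix f2 p.1 st' := by
            apply ih _ _ p.1 st' hUst' (by omega) (by omega) hcond.2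
              (hv p (List.mem_cons_self ..)).1 (hv p (List.mem_cons_self ..)).2
          rw [heq]
          exact ihp (fun q hq => hv q (List.mem_cons_of_mem _ hq)) _
            (fun x hx => pvDfsA_mono _ _ _ _ (hsub x hx))
        · rw [if_neg hcond, if_neg hcond]
          exact ihp (fun q hq => hv q (List.mem_cons_of_mem _ hq)) _ hsub
    exact aux _ (pvEnum_valid hpre n) _ (fun x hx => hx)

theorem pvProc_fuel {matrix : List (List Int)} (hpre : Pre_find_one_way_connected_components_deg matrix)
    {k f f' : Nat} (hf : k + 1 ≤ f) (hf' : k + 1 ≤ f') :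
    ∀ (ns : List Int) (st : PySem.Set Int × List Int),
      pvU matrix.length st.1 ≤ k →
      (∀ m ∈ ns, 0 ≤ m ∧ m < (matrix.length : Int)) →
      pvProc matrix f ns st = pvProc matrix f' ns st := by
  intro ns
  induction ns with
  | nil => intro st _ _; simp [pvProc]
  | cons n ns ih =>
    intro st hU hv
    simp only [pvProc]
    by_cases hc : PySem.Set.contains st.1 n = true
    · rw [if_pos hc, if_pos hc]
      exact ih st hU (fun m hm => hv m (List.mem_cons_of_mem _ hm))
    · rw [if_neg hc, if_neg hc]
      have heq : pvDfsA matrix f n st = pvDfsA matrix f' n st :=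
        pvDfsA_fuel hpre k f f' n st hU hf hf' hc (hv n (List.mem_cons_self ..)).1
          (hv n (List.mem_cons_self ..)).2
      rw [heq]
      exact ih _ (le_trans (pvU_mono (fun x hx => pvC.mp (pvDfsA_mono _ _ _ _ (pvC.mpr hx)))) hU)
        (fun m hm => hv m (List.mem_cons_of_mem _ hm))

theorem pvProc_append {matrix : List (List Int)} {fa : Nat} :
    ∀ (xs ys : List Int) (st : PySem.Set Int × List Int),
      pvProc matrix fa (xs ++ ys) st = pvProc matrix fa ys (pvProc matrix fa xs st) := by
  intro xs
  induction xs with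
  | nil => intro ys st; simp [pvProc]
  | cons x xs ih =>
    intro ys st
    simp only [List.cons_append, pvProc]
    split
    · exact ih ys st
    · exact ih ys _

theorem pvProc_drop {matrix : List (List Int)} {fa : Nat} {v₀ : PySem.Set Int} :
    ∀ (ms : List Int) (st : PySem.Set Int × List Int),
      (∀ x, PySem.Set.contains v₀ x = true → PySem.Set.contains st.1 x = true) →
      pvProc matrix fa (ms.filter (fun m => !(PySem.Set.contains v₀ m))) st
        = pvProc matrix fa ms st := by
  intro ms
  induction ms with
  | nil => intro st _; simp
  | cons m ms ih =>
    intro st hsub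
    by_cases hm : PySem.Set.contains v₀ m = true
    · rw [List.filter_cons_of_neg (by rw [hm]; decide)]
      have : PySem.Set.contains st.1 m = true := hsub m hm
      simp only [pvProc, this, if_pos]
      exact ih st hsub
    · rw [List.filter_cons_of_pos (by
        cases hb : PySem.Set.contains v₀ m with
        | true => exact absurd hb hm
        | false => decide)]
      simp only [pvProc]
      by_cases hc : PySem.Set.contains st.1 m = true
      · rw [if_pos hc, if_pos hc]; exact ih st hsub
      · rw [if_neg hc, if_neg hc]
        exact ih _ (fun x hx => pvDfsA_mono _ _ _ _ (hsub x hx))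

theorem pvF_eq (matrix : List (List Int)) (v : PySem.Set Int) (node : Int) :
    (PySem.List.pyRange 0 ((pvRow matrix node).length : Int)).filter
        (fun nb => decide (PySem.List.pyGetD (pvRow matrix node) nb 0 = 1
          ∧ ¬ (PySem.Set.contains v nb = true)))
      = pvF matrix v node := by
  unfold pvF pvMs
  rw [show PySem.List.enumerate (pvRow matrix node)
      = (PySem.List.pyRange 0 ((pvRow matrix node).length : Int)).map
          (fun j => (j, PySem.List.pyGetD (pvRow matrix node) j 0)) by
    simpa using PySem.List.enumerate_eq_map_pyRange (pvRow matrix node) 0]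
  rw [List.filter_map, List.filter_map, List.filter_map, List.map_map, List.filter_filter]
  have hid : ((fun (x : Int × Int) => x.1) ∘
      (fun j => (j, PySem.List.pyGetD (pvRow matrix node) j 0))) = fun j => j := rfl
  rw [hid, List.map_id']
  apply List.filter_congr
  intro j _
  simp only [Function.comp]
  by_cases h1 : PySem.List.pyGetD (pvRow matrix node) j 0 = 1 <;> simp [h1]

theorem pvF_len {matrix : List (List Int)} {v : PySem.Set Int} {n : Int} :
    (pvF matrix v n).length ≤ (pvRow matrix n).length := by
  unfold pvF pvMs
  calc _ ≤ (((PySem.List.enumerate (pvRow matrix n)).filter (fun p => p.2 == 1)).map (·.1)).length :=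
        List.length_filter_le _ _
    _ = ((PySem.List.enumerate (pvRow matrix n)).filter (fun p => p.2 == 1)).length := List.length_map ..
    _ ≤ (PySem.List.enumerate (pvRow matrix n)).length := List.length_filter_le _ _
    _ = _ := PySem.List.length_enumerate ..

theorem pvMain {matrix : List (List Int)} (hpre : Pre_find_one_way_connected_components_deg matrix) :
    ∀ (k : Nat) (s : List Int) (v : PySem.Set Int) (c : List Int) (fa fb : Nat),
      pvU matrix.length v ≤ k →
      (∀ x ∈ s, 0 ≤ x ∧ x < (matrix.length : Int)) →
      k + 1 ≤ fa →
      s.length + (matrix.length + 1) * k + 1 ≤ fb →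
      pvHRun matrix fb (v, c) s = pvProc matrix fa s (v, c) := by
  intro k
  induction k with
  | zero =>
    intro s
    induction s with
    | nil =>
      intro v c fa fb _ _ _ hfb
      obtain ⟨fb1, rfl⟩ : ∃ fb1, fb = fb1 + 1 := ⟨fb - 1, by omega⟩
      simp [pvHRun, pvProc]
    | cons n s ihs =>
      intro v c fa fb hU hv hfa hfb
      obtain ⟨fb1, rfl⟩ : ∃ fb1, fb = fb1 + 1 := ⟨fb - 1, by omega⟩
      have hc : PySem.Set.contains v n = true :=
        pvU_zero_mem (Nat.le_zero.mp hU) (hv n (List.mem_cons_self ..)).1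
          (hv n (List.mem_cons_self ..)).2
      simp only [pvHRun, pvProc, hc, if_pos]
      exact ihs v c fa fb1 hU (fun x hx => hv x (List.mem_cons_of_mem _ hx)) hfa
        (by simp at hfb ⊢; omega)
  | succ k ih =>
    intro s
    induction s with
    | nil =>
      intro v c fa fb _ _ _ hfb
      obtain ⟨fb1, rfl⟩ : ∃ fb1, fb = fb1 + 1 := ⟨fb - 1, by omega⟩
      simp [pvHRun, pvProc]
    | cons n s ihs =>
      intro v c fa fb hU hv hfa hfb
      obtain ⟨fb1, rfl⟩ : ∃ fb1, fb = fb1 + 1 := ⟨fb - 1, by omega⟩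
      obtain ⟨fa1, rfl⟩ : ∃ fa1, fa = fa1 + 1 := ⟨fa - 1, by omega⟩
      have hn0 := (hv n (List.mem_cons_self ..)).1
      have hnL := (hv n (List.mem_cons_self ..)).2
      by_cases hc : PySem.Set.contains v n = true
      · have hfb' : s.length + (matrix.length + 1) * (k + 1) + 1 ≤ fb1 := by
          simp only [List.length_cons] at hfb; omega
        simp only [pvHRun, pvProc, hc, if_pos]
        exact ihs v c (fa1+1) fb1 hU (fun x hx => hv x (List.mem_cons_of_mem _ hx)) hfa hfb'
      · simp only [pvHRun, pvProc, hc, Bool.false_eq_true, if_false]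
        have hUv' : pvU matrix.length (PySem.Set.add v n) ≤ k := by
          have := pvU_add hn0 hnL hc (v := v) (L := matrix.length); omega
        have hFlen : (pvF matrix (PySem.Set.add v n) n).length ≤ matrix.length :=
          le_trans pvF_len (pvRow_len hpre n)
        have hvF : ∀ x ∈ pvF matrix (PySem.Set.add v n) n ++ s,
            0 ≤ x ∧ x < (matrix.length : Int) := by
          intro x hx
          rcases List.mem_append.mp hx with hx | hx
          · exact pvMs_valid hpre n x (List.mem_of_mem_filter hx)
          · exact hv x (List.mem_cons_of_mem _ hx)
        have hfb2 : (pvF matrix (PySem.Set.add v n) n ++ s).length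
            + (matrix.length + 1) * k + 1 ≤ fb1 := by
          have hmul : (matrix.length + 1) * (k + 1)
              = (matrix.length + 1) * k + (matrix.length + 1) := by ring
          simp only [List.length_append, List.length_cons] at hfb ⊢
          omega
        have hfa2 : k + 1 ≤ fa1 + 1 := by omega
        rw [ih (pvF matrix (PySem.Set.add v n) n ++ s) (PySem.Set.add v n) (c ++ [n])
          (fa1+1) fb1 hUv' hvF hfa2 hfb2]
        rw [pvProc_append]
        have hdrop : pvProc matrix (fa1+1) (pvF matrix (PySem.Set.add v n) n)
            (PySem.Set.add v n, c ++ [n]) = pvProc matrix (fa1+1) (pvMs matrix n)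
            (PySem.Set.add v n, c ++ [n]) := by
          unfold pvF
          exact pvProc_drop (pvMs matrix n) _ (fun x hx => hx)
        rw [hdrop]
        rw [pvProc_fuel hpre (k := k) (f := fa1 + 1) (f' := fa1) (by omega) (by omega)
          (pvMs matrix n) (PySem.Set.add v n, c ++ [n]) hUv' (pvMs_valid hpre n)]
        rw [pvDfsA_eq_proc fa1 n (v, c)]

-- ===== the B-side correspondence =====

theorem pvInv_lookup {n : Nat} {v : PySem.Set Int} {b : List Bool} (h : pvInv n v b)
    {x : Int} (h0 : 0 ≤ x) (hL : x < (n : Int)) :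
    b.getD x.toNat false = PySem.Set.contains v x := by
  have hx : ((x.toNat : Int)) = x := by omega
  have := h.2.2 x.toNat (by omega)
  rwa [hx] at this

theorem pvInv_set {n : Nat} {v : PySem.Set Int} {b : List Bool} (h : pvInv n v b)
    {x : Int} (h0 : 0 ≤ x) (hL : x < (n : Int)) :
    pvInv n (PySem.Set.add v x) (b.set x.toNat true) := by
  obtain ⟨hlen, hmem, hidx⟩ := h
  refine ⟨by rw [List.length_set]; exact hlen, ?_, ?_⟩
  · intro y hy
    rcases pvC_add.mp (pvC.mpr hy) with hy' | rfl
    · exact hmem y hy'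
    · exact ⟨h0, hL⟩
  · intro i hi
    by_cases hix : i = x.toNat
    · have hlt : x.toNat < b.length := by omega
      have hset : (b.set x.toNat true).getD i false = true := by
        rw [hix]
        simp [List.getD, hlt]
      rw [hset]
      have hxi : ((i : Int)) = x := by omega
      rw [hxi]
      exact (pvC_add.mpr (Or.inr rfl)).symm
    · have hxne : x.toNat ≠ i := fun h => hix h.symm
      have hset : (b.set x.toNat true).getD i false = b.getD i false := by
        simp [List.getD, hxne]
      rw [hset, hidx i hi]
      have hne : ((i : Int)) ≠ x := by omega
      cases hc : PySem.Set.contains v (i : Int) with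
      | true => exact (pvC_add.mpr (Or.inl (pvC.mp hc))).symm
      | false =>
        symm
        rw [Bool.eq_false_iff]
        intro habs
        rcases pvC_add.mp habs with hin | heq
        · rw [pvC.mpr hin] at hc; exact Bool.noConfusion hc
        · exact hne heq

theorem pvInv_init (n : Nat) : pvInv n PySem.Set.empty (List.replicate n false) := by
  refine ⟨List.length_replicate .., ?_, ?_⟩
  · intro x hx; exact absurd hx (by simp [PySem.Set.empty])
  · intro i hi
    rw [List.getD, List.getElem?_replicate]
    simp [hi, PySem.Set.contains, PySem.Set.empty]

theorem pvNbrs_rev {matrix : List (List Int)} {v : PySem.Set Int} {b : List Bool}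
    (h : pvInv matrix.length v b) (node : Int)
    (hlen : (pvRow matrix node).length ≤ matrix.length) :
    (pvNbrs (pvRow matrix node) b).reverse = pvF matrix v node := by
  unfold pvNbrs
  have hrange : PySem.List.pyRange (((pvRow matrix node).length : Int) - 1) (-1) (-1)
      = (PySem.List.pyRange 0 ((pvRow matrix node).length : Int)).reverse := by
    rw [PySem.List.pyRange_neg_one_eq_reverse]
    norm_num
  rw [hrange, List.filter_reverse, List.reverse_reverse, ← pvF_eq]
  apply List.filter_congr
  intro j hj
  rw [PySem.List.mem_pyRange_one] at hj
  have hb : b.getD j.toNat false = PySem.Set.contains v j := by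
    apply pvInv_lookup h hj.1
    omega
  rw [hb]
  by_cases h1 : PySem.List.pyGetD (pvRow matrix node) j 0 = 1 <;>
    cases hc : PySem.Set.contains v j <;> simp [h1]

theorem pvLoopB_hrun {matrix : List (List Int)}
    (hpre : Pre_find_one_way_connected_components_deg matrix) :
    ∀ (f : Nat) (v : PySem.Set Int) (b : List Bool) (c s : List Int),
      pvInv matrix.length v b → (∀ x ∈ s, 0 ≤ x ∧ x < (matrix.length : Int)) →
      (pvLoopB matrix f b c s).2 = (pvHRun matrix f (v, c) s.reverse).2 ∧
      pvInv matrix.length (pvHRun matrix f (v, c) s.reverse).1 (pvLoopB matrix f b c s).1 := by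
  intro f
  induction f with
  | zero => intro v b c s hinv _; exact ⟨rfl, hinv⟩
  | succ f ih =>
    intro v b c s hinv hs
    rcases List.eq_nil_or_concat s with rfl | ⟨xs, x, rfl⟩
    · simp only [List.reverse_nil, pvLoopB, pvHRun, PySem.List.pop?]
      exact ⟨rfl, hinv⟩
    · simp only [List.concat_eq_append] at hs ⊢
      rw [List.reverse_append, List.reverse_singleton, List.singleton_append]
      have hx0 := (hs x (by simp)).1
      have hxL := (hs x (by simp)).2
      have hxs : ∀ y ∈ xs, 0 ≤ y ∧ y < (matrix.length : Int) :=
        fun y hy => hs y (List.mem_append.mpr (Or.inl hy))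
      have hguard : b.getD x.toNat false = PySem.Set.contains v x := pvInv_lookup hinv hx0 hxL
      simp only [pvLoopB, PySem.List.pop?_last, pvHRun]
      by_cases hc : PySem.Set.contains v x = true
      · rw [hguard, hc]
        simp only [if_pos]
        exact ih v b c xs hinv hxs
      · rw [hguard]
        rw [Bool.not_eq_true] at hc
        rw [hc]
        simp only [Bool.false_eq_true, if_false]
        have hinv' : pvInv matrix.length (PySem.Set.add v x) (b.set x.toNat true) :=
          pvInv_set hinv hx0 hxL
        have hrow : (PySem.List.pyGet? matrix x).getD [] = pvRow matrix x := rfl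
        rw [hrow]
        have hnb : (pvNbrs (pvRow matrix x) (b.set x.toNat true)).reverse
            = pvF matrix (PySem.Set.add v x) x :=
          pvNbrs_rev hinv' x (pvRow_len hpre x)
        have hbounds : ∀ y ∈ xs ++ pvNbrs (pvRow matrix x) (b.set x.toNat true),
            0 ≤ y ∧ y < (matrix.length : Int) := by
          intro y hy
          rcases List.mem_append.mp hy with hy | hy
          · exact hxs y hy
          · have : y ∈ pvF matrix (PySem.Set.add v x) x := by
              rw [← hnb, List.mem_reverse]; exact hy
            exact pvMs_valid hpre x y (List.mem_of_mem_filter this)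
        have := ih (PySem.Set.add v x) (b.set x.toNat true) (c ++ [x])
          (xs ++ pvNbrs (pvRow matrix x) (b.set x.toNat true)) hinv' hbounds
        rwa [List.reverse_append, hnb] at this

theorem pvOuter2 {matrix : List (List Int)}
    (hpre : Pre_find_one_way_connected_components_deg matrix) :
    ∀ (nodes : List Int) (stA : PySem.Set Int × List (List Int)) (stB : List Bool × List (List Int)),
      (∀ x ∈ nodes, 0 ≤ x ∧ x < (matrix.length : Int)) →
      pvInv matrix.length stA.1 stB.1 → stA.2 = stB.2 →
      (nodes.foldl
        (fun (st : PySem.Set Int × List (List Int)) node =>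
          if ¬ (PySem.Set.contains st.1 node = true) then
            let r := pvDfsA matrix (matrix.length + 1) node (st.1, [])
            (r.1, st.2 ++ [r.2])
          else st) stA).2
      = (nodes.foldl
        (fun (st : List Bool × List (List Int)) root =>
          if st.1.getD root.toNat false then st
          else
            let r := pvLoopB matrix ((matrix.length + 1) * (matrix.length + 1)) st.1 [] [root]
            (r.1, st.2 ++ [r.2])) stB).2 := by
  intro nodes
  induction nodes with
  | nil => intro stA stB _ _ h2; exact h2
  | cons n nodes ih =>
    intro stA stB hv hinv h2
    have hn0 := (hv n (List.mem_cons_self ..)).1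
    have hnL := (hv n (List.mem_cons_self ..)).2
    have hguard : stB.1.getD n.toNat false = PySem.Set.contains stA.1 n :=
      pvInv_lookup hinv hn0 hnL
    simp only [List.foldl_cons]
    by_cases hc : PySem.Set.contains stA.1 n = true
    · rw [if_neg (fun h => h hc), hguard, hc]
      simp only [if_true]
      exact ih stA stB (fun x hx => hv x (List.mem_cons_of_mem _ hx)) hinv h2
    · rw [if_pos hc, hguard]
      rw [Bool.not_eq_true] at hc
      rw [hc]
      simp only [Bool.false_eq_true, if_false]
      have hc' : ¬ (PySem.Set.contains stA.1 n = true) := by rw [hc]; exact Bool.false_ne_true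
      have hloop := pvLoopB_hrun hpre ((matrix.length + 1) * (matrix.length + 1))
        stA.1 stB.1 [] [n] hinv
        (by intro y hy; rw [List.mem_singleton] at hy; exact hy ▸ ⟨hn0, hnL⟩)
      rw [List.reverse_singleton] at hloop
      have hH : pvHRun matrix ((matrix.length + 1) * (matrix.length + 1)) (stA.1, []) [n]
          = pvDfsA matrix (matrix.length + 1) n (stA.1, []) := by
        rw [pvMain hpre (pvU matrix.length stA.1) [n] stA.1 [] (matrix.length + 1)
          ((matrix.length + 1) * (matrix.length + 1)) le_rfl
          (by intro y hy; rw [List.mem_singleton] at hy; exact hy ▸ ⟨hn0, hnL⟩)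
          (by have := pvU_le (L := matrix.length) stA.1; omega)
          (by have := pvU_le (L := matrix.length) stA.1; simp only [List.length_singleton]; nlinarith)]
        simp only [pvProc, hc, Bool.false_eq_true, if_false]
      rw [hH] at hloop
      apply ih _ _ (fun x hx => hv x (List.mem_cons_of_mem _ hx)) hloop.2
      simp only []
      rw [h2, hloop.1]

-- ===== VERDICT (by name: the statement is the Claim_ definition above) =====
theorem find_one_way_connected_components_deg_spec : Claim_equal_find_one_way_connected_components_deg := by
  intro matrix _ hpre
  unfold Spec_find_one_way_connected_components_deg
  unfold find_one_way_connected_components_deg find_one_way_connected_components_deg_alt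
  simp only [List.length_map]
  apply pvOuter2 hpre _ _ _ _ (pvInv_init matrix.length) rfl
  intro x hx
  rw [PySem.List.mem_sorted] at hx
  rw [PySem.List.mem_pyRange_one] at hx
  exact hx
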